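-- pv_equiv track=rewrite | github.com/allamosas/advent-of-code-2024 | 04/04_part1.py | horizontal_search
-- ===== SOURCE A (Python) =====
-- def horizontal_search(matrix):
--     count = 0
--     #Se comprueba en que dirección se busca
--
--     for line in matrix: #Por cada linea se busca que aparezca SAMX
--         for i, char in enumerate(line):
--             if i + 3 < len(line):
--                 if (line[i] == 'S'
--                     and line[i+1] == 'A'
--                     and line[i+2] == 'M'
--                     and line[i+3] == 'X'
--                         ):
--                     count += 1
--
--     for line in matrix: #Por cada linea se busca que aparezca XMAS
--         for i, char in enumerate(line):
--             if i + 3 < len(line):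
--                 if (line[i] == 'X'
--                     and line[i+1] == 'M'
--                     and line[i+2] == 'A'
--                     and line[i+3] == 'S'
--                         ):
--                     count += 1
--     return count
-- ===== SOURCE B (Python) =====
-- def horizontal_search(matrix):
--     # One pass over the matrix; slide a 4-char window over each line and
--     # compare the slice against both patterns at once.
--     total = 0
--     for line in matrix:
--         for i in range(len(line) - 3):
--             w = line[i:i+4]
--             if w == 'XMAS':
--                 total += 1
--             if w == 'SAMX':
--                 total += 1
--     return total
-- ===== Notes on version B (the rewrite author's own statement) =====
-- stated objective: idiomatic
-- what changed: Replaces A's two separate passes over the matrix (one per pattern, each comparing four characters by index under an enumerate guard) with a single pass that slides a 4-character slice window over each line and compares the slice against both patterns at once.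
import Mathlib
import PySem

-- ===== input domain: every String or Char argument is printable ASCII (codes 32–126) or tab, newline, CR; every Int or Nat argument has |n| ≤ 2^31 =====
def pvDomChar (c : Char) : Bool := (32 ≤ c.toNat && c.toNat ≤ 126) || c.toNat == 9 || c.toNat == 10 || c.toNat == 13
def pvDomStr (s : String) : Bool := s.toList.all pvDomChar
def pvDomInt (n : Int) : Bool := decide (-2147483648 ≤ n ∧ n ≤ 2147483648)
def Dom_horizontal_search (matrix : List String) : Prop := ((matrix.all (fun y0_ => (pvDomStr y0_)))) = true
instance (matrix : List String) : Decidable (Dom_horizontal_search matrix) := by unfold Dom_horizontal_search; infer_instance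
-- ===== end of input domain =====

-- B replaces A's two index-comparison passes over the matrix with a single pass
-- comparing 4-character slices against both patterns (same cost, more idiomatic).

-- ===== PORT A =====
-- literal port of A: two passes over the matrix; enumerate gives (index, char),
-- the char is unused; line[i+k] is PySem.Str.pyGet? (always in range under the guard).
def horizontal_search (matrix : List String) : Int :=
  -- first loop: count SAMX; second loop continues from that count with XMAS
  let countS : Int := matrix.foldl (fun count line =>
    (PySem.List.enumerate line.toList).foldl (fun count p =>
      if p.1 + 3 < (line.toList.length : Int) then
        if PySem.Str.pyGet? line p.1 == some 'S'
            && PySem.Str.pyGet? line (p.1 + 1) == some 'A'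
            && PySem.Str.pyGet? line (p.1 + 2) == some 'M'
            && PySem.Str.pyGet? line (p.1 + 3) == some 'X' then
          count + 1
        else count
      else count) count) 0
  matrix.foldl (fun count line =>
    (PySem.List.enumerate line.toList).foldl (fun count p =>
      if p.1 + 3 < (line.toList.length : Int) then
        if PySem.Str.pyGet? line p.1 == some 'X'
            && PySem.Str.pyGet? line (p.1 + 1) == some 'M'
            && PySem.Str.pyGet? line (p.1 + 2) == some 'A'
            && PySem.Str.pyGet? line (p.1 + 3) == some 'S' then
          count + 1
        else count
      else count) count) countS

-- ===== PORT B =====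
-- port of Source B: one pass; range(len(line)-3) is List.range (Nat subtraction = Python's
-- empty range on a negative bound); line[i:i+4] is PySem.Chars.slice on the code points.
def horizontal_search_alt (matrix : List String) : Int :=
  matrix.foldl (fun total line =>
    (List.range (line.toList.length - 3)).foldl (fun total (i : Nat) =>
      let w := PySem.Chars.slice line.toList (some (i : Int)) (some ((i : Int) + 4))
      let total := if w == "XMAS".toList then total + 1 else total
      if w == "SAMX".toList then total + 1 else total) total) 0

-- ===== PRECONDITION & SPEC =====
def Spec_horizontal_search (matrix : List String) (out : Int) : Prop := out = horizontal_search_alt matrix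
instance (matrix : List String) (out : Int) : Decidable (Spec_horizontal_search matrix out) := by unfold Spec_horizontal_search; infer_instance

-- ===== CLAIM (what is proved, stated in full; the proofs are below) =====
def Claim_equal_horizontal_search : Prop := ∀ (matrix : List String), Dom_horizontal_search matrix → Spec_horizontal_search matrix (horizontal_search matrix)

-- ===== LEMMAS AND PROOFS =====

-- number of positions i in a line cs at which the 4-char window reads [a,b,c,d]
def pvWin (a b c d : Char) (cs : List Char) : Int :=
  ((List.range (cs.length - 3)).countP
    (fun i => List.take 4 (List.drop i cs) == [a, b, c, d]) : Nat)

theorem pv_window4 (cs : List Char) (k : Nat) (h : k + 3 < cs.length) (a b c d : Char) :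
    (List.take 4 (List.drop k cs) == [a, b, c, d])
      = (cs[k]? == some a && cs[k+1]? == some b && cs[k+2]? == some c && cs[k+3]? == some d) := by
  have h0 : k < cs.length := by omega
  have h1 : k + 1 < cs.length := by omega
  have h2 : k + 2 < cs.length := by omega
  have hd : List.take 4 (List.drop k cs) = [cs[k], cs[k+1], cs[k+2], cs[k+3]] := by
    have e0 : List.drop k cs = cs[k] :: List.drop (k+1) cs := (List.getElem_cons_drop h0).symm
    have e1 : List.drop (k+1) cs = cs[k+1] :: List.drop (k+2) cs := by
      have := (List.getElem_cons_drop h1).symm; simpa using this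
    have e2 : List.drop (k+2) cs = cs[k+2] :: List.drop (k+3) cs := by
      have := (List.getElem_cons_drop h2).symm; simpa using this
    have e3 : List.drop (k+3) cs = cs[k+3] :: List.drop (k+4) cs := by
      have := (List.getElem_cons_drop h).symm; simpa using this
    rw [e0, e1, e2, e3]
    rfl
  rw [hd]
  simp [h0, h1, h2, h, Bool.and_assoc]

-- a foldl that adds 1 under a guarded condition counts positions
theorem pv_foldl_guard {α : Type} (p : α → Prop) [DecidablePred p] (q : α → Bool)
    (l : List α) (t : Int) :
    l.foldl (fun acc x => if p x then (if q x then acc + 1 else acc) else acc) t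
      = t + (l.countP (fun x => decide (p x) && q x) : Nat) := by
  induction l generalizing t with
  | nil => simp
  | cons x xs ih =>
    simp only [List.foldl_cons, List.countP_cons]
    by_cases hp : p x <;> by_cases hq : q x = true <;> simp [hp, hq, ih] <;> ring

-- B's inner body: two sequential increments count each pattern once
theorem pv_foldl_two {α : Type} (p q : α → Bool) (l : List α) (t : Int) :
    l.foldl (fun acc x =>
        if q x then (if p x then acc + 1 else acc) + 1 else (if p x then acc + 1 else acc)) t
      = t + (l.countP p : Nat) + (l.countP q : Nat) := by
  induction l generalizing t with
  | nil => simp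
  | cons x xs ih =>
    simp only [List.foldl_cons, List.countP_cons]
    by_cases hp : p x = true <;> by_cases hq : q x = true <;> simp [hp, hq, ih] <;> ring

-- a fold whose step is 'accumulator + per-element value' is a sum
theorem pv_foldl_shift {α : Type} (f : Int → α → Int) (g : α → Int)
    (h : ∀ t x, f t x = t + g x) (l : List α) (t : Int) :
    l.foldl f t = t + (l.map g).sum := by
  induction l generalizing t with
  | nil => simp
  | cons x xs ih => simp [h, ih]; ring

-- countP over range n under the guard 'k+3 < n' restricts to range (n-3)
theorem pv_countP_range_guard (n : Nat) (q : Nat → Bool) :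
    (List.range n).countP (fun (k : Nat) => decide ((k : Int) + 3 < (n : Int)) && q k)
      = (List.range (n - 3)).countP q := by
  rcases Nat.lt_or_ge n 3 with hn | hn
  · have h1 : (List.range n).countP (fun (k : Nat) => decide ((k : Int) + 3 < (n : Int)) && q k) = 0 := by
      apply List.countP_eq_zero.mpr
      intro k hk
      simp only [Bool.and_eq_true, decide_eq_true_eq]
      rintro ⟨hlt, -⟩
      omega
    have h2 : n - 3 = 0 := by omega
    simp [h1, h2]
  · obtain ⟨m, rfl⟩ : ∃ m, n = m + 3 := ⟨n - 3, by omega⟩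
    rw [List.range_add, List.countP_append]
    have h1 : (List.range m).countP
        (fun (k : Nat) => decide ((k : Int) + 3 < ((m + 3 : Nat) : Int)) && q k)
        = (List.range m).countP q := by
      apply List.countP_congr
      intro k hk
      have hlt : k < m := List.mem_range.mp hk
      have hc : ((k : Int) + 3 < ((m + 3 : Nat) : Int)) := by push_cast; omega
      rw [decide_eq_true hc, Bool.true_and]
    have h2 : ((List.range 3).map (fun x => m + x)).countP
        (fun (k : Nat) => decide ((k : Int) + 3 < ((m + 3 : Nat) : Int)) && q k) = 0 := by
      apply List.countP_eq_zero.mpr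
      intro k hk
      simp only [List.mem_map, List.mem_range] at hk
      obtain ⟨j, hj, rfl⟩ := hk
      simp only [Bool.and_eq_true, decide_eq_true_eq]
      rintro ⟨hlt, -⟩
      push_cast at hlt
      omega
    rw [h1, h2]
    simp

-- A's inner loop over one line counts the windows reading [a,b,c,d]
theorem pv_innerA (line : String) (a b c d : Char) (t : Int) :
    (PySem.List.enumerate line.toList).foldl (fun count p =>
      if p.1 + 3 < (line.toList.length : Int) then
        if PySem.Str.pyGet? line p.1 == some a
            && PySem.Str.pyGet? line (p.1 + 1) == some b
            && PySem.Str.pyGet? line (p.1 + 2) == some c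
            && PySem.Str.pyGet? line (p.1 + 3) == some d then
          count + 1
        else count
      else count) t = t + pvWin a b c d line.toList := by
  set cs := line.toList with hcs
  rw [PySem.List.enumerate_eq_map_pyRange cs ' ']
  rw [PySem.List.pyRange_of_pos _ _ (by norm_num : (0:Int) < 1)]
  rw [List.map_map, List.foldl_map]
  simp only [Function.comp_apply, zero_add, one_mul]
  rw [show (if 0 < PySem.List.len cs then ((PySem.List.len cs - 0 + 1 - 1) / 1).toNat else 0)
        = cs.length from by simp [PySem.List.len]; intro h; simp [h]]
  rw [pv_foldl_guard (fun y : Nat => ((y : Int) + 3 < (cs.length : Int)))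
        (fun y : Nat => PySem.Str.pyGet? line (y : Int) == some a
          && PySem.Str.pyGet? line ((y : Int) + 1) == some b
          && PySem.Str.pyGet? line ((y : Int) + 2) == some c
          && PySem.Str.pyGet? line ((y : Int) + 3) == some d)]
  congr 1
  rw [pv_countP_range_guard cs.length
        (fun y : Nat => PySem.Str.pyGet? line (y : Int) == some a
          && PySem.Str.pyGet? line ((y : Int) + 1) == some b
          && PySem.Str.pyGet? line ((y : Int) + 2) == some c
          && PySem.Str.pyGet? line ((y : Int) + 3) == some d)]
  unfold pvWin
  congr 1
  apply List.countP_congr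
  intro k hk
  have hlt : k < cs.length - 3 := List.mem_range.mp hk
  rw [pv_window4 cs k (by omega) a b c d]
  have e1 : ((k : Int) + 1) = ((k + 1 : Nat) : Int) := by push_cast; ring
  have e2 : ((k : Int) + 2) = ((k + 2 : Nat) : Int) := by push_cast; ring
  have e3 : ((k : Int) + 3) = ((k + 3 : Nat) : Int) := by push_cast; ring
  simp only [e1, e2, e3, PySem.Str.pyGet?_natCast, ← hcs]

-- B's inner loop over one line counts both patterns
theorem pv_innerB (line : String) (t : Int) :
    (List.range (line.toList.length - 3)).foldl (fun total (i : Nat) =>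
      let w := PySem.Chars.slice line.toList (some (i : Int)) (some ((i : Int) + 4))
      let total := if w == "XMAS".toList then total + 1 else total
      if w == "SAMX".toList then total + 1 else total) t
      = t + pvWin 'X' 'M' 'A' 'S' line.toList + pvWin 'S' 'A' 'M' 'X' line.toList := by
  set cs := line.toList with hcs
  have hX : "XMAS".toList = ['X', 'M', 'A', 'S'] := by decide
  have hS : "SAMX".toList = ['S', 'A', 'M', 'X'] := by decide
  have hsl : ∀ i : Nat, PySem.Chars.slice cs (some (i : Int)) (some ((i : Int) + 4))
      = List.take 4 (List.drop i cs) := by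
    intro i
    rw [PySem.Chars.slice_eq_listSlice,
        show ((i : Int) + 4) = ((i + 4 : Nat) : Int) by push_cast; ring,
        PySem.List.slice_natCast]
    congr 1
    omega
  simp only [hsl, hX, hS]
  rw [pv_foldl_two (fun i : Nat => List.take 4 (List.drop i cs) == ['X', 'M', 'A', 'S'])
        (fun i : Nat => List.take 4 (List.drop i cs) == ['S', 'A', 'M', 'X'])]
  unfold pvWin
  ring

theorem horizontal_search_eq (matrix : List String) :
    horizontal_search matrix = horizontal_search_alt matrix := by
  unfold horizontal_search horizontal_search_alt
  rw [pv_foldl_shift _ (fun line => pvWin 'S' 'A' 'M' 'X' line.toList)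
        (fun t line => pv_innerA line 'S' 'A' 'M' 'X' t) matrix 0,
      pv_foldl_shift _ (fun line => pvWin 'X' 'M' 'A' 'S' line.toList)
        (fun t line => pv_innerA line 'X' 'M' 'A' 'S' t) matrix _,
      pv_foldl_shift _
        (fun line => pvWin 'X' 'M' 'A' 'S' line.toList + pvWin 'S' 'A' 'M' 'X' line.toList)
        (fun t line => by rw [pv_innerB line t]; ring) matrix 0]
  rw [PySem.List.sum_map_add_int]
  ring

-- ===== VERDICT (by name: the statement is the Claim_ definition above) =====
theorem horizontal_search_spec : Claim_equal_horizontal_search := by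
  intro matrix _
  unfold Spec_horizontal_search
  exact horizontal_search_eq matrix
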